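-- pv_equiv track=rewrite | github.com/Nikhil-Prasad/Rosalind | biology/mortal_fib_rabbits/mortal_rabbits_fib.py | fib
-- ===== SOURCE A (Python) =====
-- def fib(n,m):
--     if n < m:
--         if n == 0:
--             return 0
--         elif n == 1:
--             return 1
--         elif n == 2:
--             return 1
--         else:
--             return fib(n-1,m) + fib(n-2,m)
--     elif n == m:
--         return fib(n-1,m) + fib(n-2,m) - 1
--     else:
--         return fib(n-1,m) + fib(n-2,m) - fib(n-(m+1),m)
-- ===== SOURCE B (Python) =====
-- def fib(n, m):
--     # Bottom-up: build the table f[0..n] of population counts once, O(n).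
--     f = []
--     for k in range(n + 1):
--         if k == 0:
--             f.append(0)
--         elif k <= 2 and k < m:
--             f.append(1)
--         elif k < m:
--             f.append(f[k - 1] + f[k - 2])
--         elif k == m:
--             f.append(f[k - 1] + f[k - 2] - 1)
--         else:
--             f.append(f[k - 1] + f[k - 2] - f[k - m - 1])
--     return f[n]
-- ===== Notes on version B (the rewrite author's own statement) =====
-- stated objective: faster
-- what changed: Replaced the triple-branching recursion by a single bottom-up pass that fills a table f[0..n] with the same mortal-rabbit recurrence and returns f[n]; intended as faster (O(n) vs exponential; in a timing run A timed out at n=16 where B answered in under a millisecond, measured ratio >1000x on the one input A finished).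
import Mathlib
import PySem

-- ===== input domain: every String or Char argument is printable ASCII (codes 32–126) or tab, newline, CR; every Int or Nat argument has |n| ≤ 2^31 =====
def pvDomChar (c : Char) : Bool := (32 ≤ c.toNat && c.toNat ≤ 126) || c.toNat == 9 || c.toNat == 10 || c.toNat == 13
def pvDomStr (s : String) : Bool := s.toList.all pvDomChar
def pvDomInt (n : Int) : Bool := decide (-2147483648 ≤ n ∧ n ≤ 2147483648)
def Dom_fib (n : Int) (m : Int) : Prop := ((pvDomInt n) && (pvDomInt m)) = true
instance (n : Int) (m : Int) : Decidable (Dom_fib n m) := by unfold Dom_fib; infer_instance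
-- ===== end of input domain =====

-- B replaces A's branching recursion by one bottom-up pass filling a table f[0..n]; intended as faster (a timing run saw A time out at n=16 where B returned, ratio >1000x on the input A finished).

-- ===== PORT A =====
-- A's branching recursion; fuel only makes the same computation total (under Pre_fib the fuel never runs out).
def fibF : Nat → Int → Int → Int
  | 0, _, _ => 0
  | fuel+1, n, m =>
    if n < m then
      if n = 0 then 0
      else if n = 1 then 1
      else if n = 2 then 1
      else fibF fuel (n-1) m + fibF fuel (n-2) m
    else if n = m then fibF fuel (n-1) m + fibF fuel (n-2) m - 1
    else fibF fuel (n-1) m + fibF fuel (n-2) m - fibF fuel (n-(m+1)) m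

def fib (n : Int) (m : Int) : Int := fibF (n.toNat + 1) n m

-- ===== PORT B =====
-- loop body of B: one step of the table fill (pyGetD's default 0 is a totality guard; indices are in range under Pre_fib)
def fibStep (m : Int) (f : List Int) (k : Int) : List Int :=
  if k = 0 then f ++ [0]
  else if k ≤ 2 ∧ k < m then f ++ [1]
  else if k < m then f ++ [PySem.List.pyGetD f (k-1) 0 + PySem.List.pyGetD f (k-2) 0]
  else if k = m then f ++ [PySem.List.pyGetD f (k-1) 0 + PySem.List.pyGetD f (k-2) 0 - 1]
  else f ++ [PySem.List.pyGetD f (k-1) 0 + PySem.List.pyGetD f (k-2) 0 - PySem.List.pyGetD f (k-m-1) 0]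

def fib_alt (n : Int) (m : Int) : Int :=
  let f := (PySem.List.pyRange 0 (n+1) 1).foldl (fibStep m) []
  PySem.List.pyGetD f n 0

-- ===== PRECONDITION & SPEC =====
-- Pre_fib admits every input on which A returns: nonnegative n with m at least 2, plus the degenerate
-- shape m = 1 with n = 0; on everything else A's recursion never reaches a base case and raises RecursionError.
def Pre_fib (n : Int) (m : Int) : Prop := 0 ≤ n ∧ (2 ≤ m ∨ (m = 1 ∧ n = 0))
instance (n : Int) (m : Int) : Decidable (Pre_fib n m) := by unfold Pre_fib; infer_instance
def pvWitness_fib : Int × Int := (7, 3)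

def Spec_fib (n : Int) (m : Int) (out : Int) : Prop := out = fib_alt n m
instance (n : Int) (m : Int) (out : Int) : Decidable (Spec_fib n m out) := by unfold Spec_fib; infer_instance

-- ===== CLAIM (what is proved, stated in full; the proofs are below) =====
def Claim_equal_fib : Prop := ∀ (n : Int) (m : Int), Dom_fib n m → Pre_fib n m → Spec_fib n m (fib n m)

-- ===== LEMMAS AND PROOFS =====

-- the common mathematical recurrence both ports compute (proof-only helper)
def g (m : Int) : Nat → Int
  | 0 => 0
  | 1 => 1
  | (k+2) =>
    if ((k+2 : Nat) : Int) < m then g m (k+1) + g m k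
    else if ((k+2 : Nat) : Int) = m then g m (k+1) + g m k - 1
    else g m (k+1) + g m k - g m (k + 1 - m.toNat)
termination_by k => k
decreasing_by all_goals omega

theorem fibF_eq_g (fuel : Nat) : ∀ (n m : Int), 2 ≤ m → 0 ≤ n → n.toNat < fuel →
    fibF fuel n m = g m n.toNat := by
  induction fuel with
  | zero => intro n m _ _ h; omega
  | succ fuel ih =>
    intro n m hm hn hf
    by_cases h0 : n = 0
    · subst h0; simp [fibF, show (0:Int) < m from by omega, g]
    by_cases h1 : n = 1
    · subst h1; simp [fibF, show (1:Int) < m from by omega, g]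
    obtain ⟨k, hk⟩ : ∃ k : Nat, n.toNat = k + 2 := ⟨n.toNat - 2, by omega⟩
    have hcast : ((k+2 : Nat) : Int) = n := by omega
    have c1 : fibF fuel (n-1) m = g m (k+1) := by
      rw [ih (n-1) m hm (by omega) (by omega)]; congr 1; omega
    have c2 : fibF fuel (n-2) m = g m k := by
      rw [ih (n-2) m hm (by omega) (by omega)]; congr 1; omega
    rw [hk, g]
    simp only [hcast]
    by_cases hlt : n < m
    · by_cases h2v : n = 2
      · simp only [fibF]
        rw [if_pos hlt, if_neg h0, if_neg h1, if_pos h2v, if_pos hlt]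
        have hk0 : k = 0 := by omega
        subst hk0
        simp [g]
      · simp only [fibF]
        rw [if_pos hlt, if_neg h0, if_neg h1, if_neg h2v, if_pos hlt, c1, c2]
    · by_cases heq : n = m
      · simp only [fibF]
        rw [if_neg hlt, if_pos heq, if_neg hlt, if_pos heq, c1, c2]
      · have c3 : fibF fuel (n-(m+1)) m = g m (k + 1 - m.toNat) := by
          rw [ih (n-(m+1)) m hm (by omega) (by omega)]; congr 1; omega
        simp only [fibF]
        rw [if_neg hlt, if_neg heq, if_neg hlt, if_neg heq, c1, c2, c3]

theorem getD_mapRange (m : Int) (N : Nat) (i : Int) (h0 : 0 ≤ i) (h1 : i < (N:Int)) :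
    PySem.List.pyGetD ((List.range N).map (g m)) i 0 = g m i.toNat := by
  rw [PySem.List.pyGetD_eq_getElem _ 0 h0 (by simp; omega)]
  simp [List.getElem_map, List.getElem_range]

theorem g_two (m : Int) (h : 2 < m) : g m 2 = 1 := by
  show g m (0+2) = 1
  rw [g]
  simp [h, g]

theorem foldl_eq_mapRange (m : Int) (hm : 2 ≤ m) (N : Nat) :
    (PySem.List.pyRange 0 (N : Int) 1).foldl (fibStep m) [] = (List.range N).map (g m) := by
  induction N with
  | zero => simp [PySem.List.pyRange_one_eq_nil]
  | succ N ih =>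
    rw [show ((N+1 : Nat) : Int) = (N : Int) + 1 from by omega,
        PySem.List.pyRange_one_succ_right (by omega : (0:Int) ≤ (N:Int)), List.foldl_append, ih,
        List.range_succ, List.map_append]
    simp only [List.foldl_cons, List.foldl_nil]
    rcases Nat.eq_or_lt_of_le (Nat.zero_le N) with h0 | hpos
    · simp [← h0, fibStep, g]
    rcases Nat.lt_or_ge N 3 with hsm | hbig
    · -- N = 1 or N = 2
      interval_cases N
      · by_cases h2 : (1:Int) < m
        · simp [fibStep, h2, g]
        · exact absurd (by omega : (1:Int) < m) h2
      · by_cases h2 : (2:Int) < m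
        · simp [fibStep, h2, g_two m h2]
        · have hm2 : m = 2 := by omega
          subst hm2
          norm_num [fibStep]
          rw [getD_mapRange 2 2 1 (by omega) (by omega),
              getD_mapRange 2 2 0 (by omega) (by omega)]
          have h22 : g 2 2 = g 2 (0+2) := rfl
          rw [h22, g]
          norm_num [g]
    · -- N ≥ 3
      obtain ⟨k, hk⟩ : ∃ k : Nat, N = k + 2 := ⟨N - 2, by omega⟩
      have hg : g m N = g m (k+2) := by rw [hk]
      have hgu : g m (k+2) = if ((k+2 : Nat) : Int) < m then g m (k+1) + g m k
          else if ((k+2 : Nat) : Int) = m then g m (k+1) + g m k - 1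
          else g m (k+1) + g m k - g m (k + 1 - m.toNat) := by rw [g]
      have e1 : PySem.List.pyGetD ((List.range N).map (g m)) ((N:Int)-1) 0 = g m (k+1) := by
        rw [getD_mapRange m N _ (by omega) (by omega)]; congr 1; omega
      have e2 : PySem.List.pyGetD ((List.range N).map (g m)) ((N:Int)-2) 0 = g m k := by
        rw [getD_mapRange m N _ (by omega) (by omega)]; congr 1; omega
      have hNm : ((k+2 : Nat) : Int) = (N : Int) := by omega
      rw [hNm] at hgu
      rw [List.map_singleton]
      unfold fibStep
      rw [if_neg (by omega), if_neg (by push_cast; omega)]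
      by_cases hlt : (N : Int) < m
      · rw [if_pos hlt, e1, e2, hg, hgu, if_pos hlt]
      · rw [if_neg hlt]
        by_cases heq : (N : Int) = m
        · rw [if_pos heq, e1, e2, hg, hgu, if_neg hlt, if_pos heq]
        · have e3 : PySem.List.pyGetD ((List.range N).map (g m)) ((N:Int)-m-1) 0
              = g m (k + 1 - m.toNat) := by
            rw [getD_mapRange m N _ (by omega) (by omega)]; congr 1; omega
          rw [if_neg heq, e1, e2, e3, hg, hgu, if_neg hlt, if_neg heq]

-- ===== VERDICT (by name: the statement is the Claim_ definition above) =====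
theorem fib_spec : Claim_equal_fib := by
  intro n m _ hpre
  unfold Spec_fib
  rcases hpre with ⟨hn, h2 | ⟨hm1, hn0⟩⟩
  · have hN : n = ((n.toNat : Nat) : Int) := by omega
    unfold fib fib_alt
    rw [fibF_eq_g (n.toNat + 1) n m h2 hn (by omega)]
    rw [show n + 1 = ((n.toNat + 1 : Nat) : Int) from by omega,
        foldl_eq_mapRange m h2 (n.toNat + 1)]
    rw [getD_mapRange m (n.toNat + 1) n hn (by omega)]
  · subst hm1; subst hn0; decide
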